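-- pv_equiv track=rewrite | github.com/Shanmukvenkat/-Automating-Cyber-Hygiene-Checks-with-Extensions | main.py | check_weak_passwords
-- ===== SOURCE A (Python) =====
-- def check_weak_passwords(passwords, weak_passwords):
--     weak_detected = []
--     failed_criteria = []
--
--     for pwd in passwords:
--         criteria = []
--         if len(pwd) < 8:
--             criteria.append("Too short")
--         if not any(c.isupper() for c in pwd):
--             criteria.append("Missing uppercase letter")
--         if not any(c.islower() for c in pwd):
--             criteria.append("Missing lowercase letter")
--         if not any(c.isdigit() for c in pwd):
--             criteria.append("Missing numeric digit")
--         if not any(c in "!@#$%^&*()-_=+[]{}|;:'\",.<>?/`~" for c in pwd):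
--             criteria.append("Missing special character")
--
--         if pwd in weak_passwords:
--             weak_detected.append(pwd)
--
--         if criteria:
--             failed_criteria.append(f"{pwd}: {', '.join(criteria)}")
--
--     return weak_detected, failed_criteria
-- ===== SOURCE B (Python) =====
-- # B: classify each character once through a precomputed char->bitmask table,
-- # OR the bits into a single mask, and derive the "Missing ..." messages from the
-- # mask bits; weak passwords are detected by membership in a prebuilt set.
--
-- _CLASS = {}
-- for _c in "ABCDEFGHIJKLMNOPQRSTUVWXYZ":
--     _CLASS[_c] = 1
-- for _c in "abcdefghijklmnopqrstuvwxyz":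
--     _CLASS[_c] = 2
-- for _c in "0123456789":
--     _CLASS[_c] = 4
-- for _c in "!@#$%^&*()-_=+[]{}|;:'\",.<>?/`~":
--     _CLASS[_c] = 8
--
-- _MSGS = ("Missing uppercase letter", "Missing lowercase letter",
--          "Missing numeric digit", "Missing special character")
--
--
-- def check_weak_passwords(passwords, weak_passwords):
--     weak = set(weak_passwords)
--     weak_detected = []
--     failed_criteria = []
--     for pwd in passwords:
--         mask = 0
--         for c in pwd:
--             mask |= _CLASS.get(c, 0)
--         msgs = (["Too short"] if len(pwd) < 8 else []) + \
--                [m for i, m in enumerate(_MSGS) if not (mask >> i) & 1]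
--         if pwd in weak:
--             weak_detected.append(pwd)
--         if msgs:
--             failed_criteria.append(pwd + ": " + ", ".join(msgs))
--     return weak_detected, failed_criteria
-- ===== Notes on version B (the rewrite author's own statement) =====
-- stated objective: faster
-- what changed: B replaces A's five per-criterion predicate scans of each password with a precomputed char-to-bitmask classification dict, ORs class bits into a single mask per password and derives the 'Missing ...' messages from the mask bits, and tests weak membership against a prebuilt set instead of scanning the weak list per password.
import Mathlib
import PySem

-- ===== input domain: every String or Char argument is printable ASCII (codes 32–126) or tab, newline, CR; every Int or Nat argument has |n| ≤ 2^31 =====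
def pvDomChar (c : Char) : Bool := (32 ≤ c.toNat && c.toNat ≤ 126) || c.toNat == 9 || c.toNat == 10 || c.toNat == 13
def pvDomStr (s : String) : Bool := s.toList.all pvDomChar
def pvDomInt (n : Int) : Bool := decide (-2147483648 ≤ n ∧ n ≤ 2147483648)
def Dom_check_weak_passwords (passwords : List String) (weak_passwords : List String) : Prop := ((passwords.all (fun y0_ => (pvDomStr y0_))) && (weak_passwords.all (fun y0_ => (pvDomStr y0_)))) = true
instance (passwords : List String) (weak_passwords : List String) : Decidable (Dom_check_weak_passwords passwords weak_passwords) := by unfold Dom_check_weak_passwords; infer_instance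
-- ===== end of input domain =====

-- B classifies each character once through a precomputed char→bitmask table, ORs the bits into one
-- mask and derives the "Missing …" messages from the mask bits, testing weak membership against a
-- prebuilt set; same return value (objective: faster, measured).

-- the special-character string literal shared by both Pythons
def pvSpecials : List Char := "!@#$%^&*()-_=+[]{}|;:'\",.<>?/`~".toList

-- ===== PORT A =====
-- A's loop body (one password): build criteria by sequential appends, then update both accumulators
def pvStepA (weak_passwords : List String) (st : List String × List String) (pwd : String) : List String × List String :=
  let criteria : List String := []
  let criteria := if PySem.Str.len pwd < 8 then criteria ++ ["Too short"] else criteria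
  let criteria := if !(pwd.toList.any (fun c => PySem.Chars.isupper c)) then criteria ++ ["Missing uppercase letter"] else criteria
  let criteria := if !(pwd.toList.any (fun c => PySem.Chars.islower c)) then criteria ++ ["Missing lowercase letter"] else criteria
  let criteria := if !(pwd.toList.any (fun c => PySem.Chars.isdigit c)) then criteria ++ ["Missing numeric digit"] else criteria
  let criteria := if !(pwd.toList.any (fun c => pvSpecials.contains c)) then criteria ++ ["Missing special character"] else criteria
  let weak_detected := if weak_passwords.contains pwd then st.1 ++ [pwd] else st.1
  let failed_criteria := if criteria ≠ [] then st.2 ++ [pwd ++ ": " ++ PySem.Str.join ", " criteria] else st.2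
  (weak_detected, failed_criteria)

def check_weak_passwords (passwords : List String) (weak_passwords : List String) : List String × List String :=
  passwords.foldl (pvStepA weak_passwords) ([], [])

-- ===== PORT B =====
-- Source B's module-level _CLASS dict: four loops inserting the class bit of each character
-- (values 1,2,4,8 and the mask are nonnegative Python ints throughout, so Nat is exact)
def pvClass : PySem.Dict Char Nat :=
  let d := "ABCDEFGHIJKLMNOPQRSTUVWXYZ".toList.foldl (fun d c => d.insert c 1) PySem.Dict.empty
  let d := "abcdefghijklmnopqrstuvwxyz".toList.foldl (fun d c => d.insert c 2) d
  let d := "0123456789".toList.foldl (fun d c => d.insert c 4) d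
  pvSpecials.foldl (fun d c => d.insert c 8) d

def pvMsgs : List String :=
  ["Missing uppercase letter", "Missing lowercase letter", "Missing numeric digit", "Missing special character"]

-- Source B's loop body: OR the class bits of the characters, read the messages off the mask bits
-- (enumerate indices are 0..3, nonnegative, so .toNat on the shift amount is exact)
def pvStepB (weak : PySem.Set String) (st : List String × List String) (pwd : String) : List String × List String :=
  let mask : Nat := pwd.toList.foldl (fun m c => m ||| pvClass.getD c 0) 0
  let msgs := (if PySem.Str.len pwd < 8 then ["Too short"] else [])
      ++ (((PySem.List.enumerate pvMsgs).filter (fun im => ((mask >>> im.1.toNat) &&& 1) == 0)).map (fun im => im.2))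
  let weak_detected := if weak.contains pwd then st.1 ++ [pwd] else st.1
  let failed_criteria := if msgs ≠ [] then st.2 ++ [pwd ++ ": " ++ PySem.Str.join ", " msgs] else st.2
  (weak_detected, failed_criteria)

def check_weak_passwords_alt (passwords : List String) (weak_passwords : List String) : List String × List String :=
  let weak := PySem.Set.ofList weak_passwords
  passwords.foldl (pvStepB weak) ([], [])

-- ===== PRECONDITION & SPEC =====
def Spec_check_weak_passwords (passwords : List String) (weak_passwords : List String) (out : List String × List String) : Prop := out = check_weak_passwords_alt passwords weak_passwords
instance (passwords : List String) (weak_passwords : List String) (out : List String × List String) : Decidable (Spec_check_weak_passwords passwords weak_passwords out) := by unfold Spec_check_weak_passwords; infer_instance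

-- ===== CLAIM (what is proved, stated in full; the proofs are below) =====
def Claim_equal_check_weak_passwords : Prop := ∀ (passwords : List String) (weak_passwords : List String), Dom_check_weak_passwords passwords weak_passwords → Spec_check_weak_passwords passwords weak_passwords (check_weak_passwords passwords weak_passwords)

-- ===== LEMMAS AND PROOFS =====

-- (mask >> i) & 1 == 0  is the negated i-th bit
lemma pvBitSel (x i : Nat) : (((x >>> i) &&& 1) == 0) = !(x.testBit i) := by
  simp only [Nat.testBit, Nat.and_one_is_mod, Nat.one_and_eq_mod_two]
  rcases Nat.mod_two_eq_zero_or_one (x >>> i) with h | h <;> simp [h]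

-- bit i of the OR-fold = some character has class bit i
lemma pvMaskBit (cs : List Char) (m0 : Nat) (i : Nat) :
    (cs.foldl (fun m c => m ||| pvClass.getD c 0) m0).testBit i
      = (m0.testBit i || cs.any (fun c => (pvClass.getD c 0).testBit i)) := by
  induction cs generalizing m0 with
  | nil => simp
  | cons c cs ih => rw [List.foldl_cons, ih]; simp [Nat.testBit_or, Bool.or_assoc]

-- the four class bits of a domain character are exactly A's four predicates (checked over all 127 codes)
set_option maxRecDepth 8192 in
lemma pvClassBits_ofNat (n : Nat) (h : n < 127) :
    ((pvClass.getD (Char.ofNat n) 0).testBit 0 = PySem.Chars.isupper (Char.ofNat n))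
    ∧ ((pvClass.getD (Char.ofNat n) 0).testBit 1 = PySem.Chars.islower (Char.ofNat n))
    ∧ ((pvClass.getD (Char.ofNat n) 0).testBit 2 = PySem.Chars.isdigit (Char.ofNat n))
    ∧ ((pvClass.getD (Char.ofNat n) 0).testBit 3 = pvSpecials.contains (Char.ofNat n)) := by
  revert h; revert n; decide

lemma pvClassBits (c : Char) (h : pvDomChar c = true) :
    ((pvClass.getD c 0).testBit 0 = PySem.Chars.isupper c)
    ∧ ((pvClass.getD c 0).testBit 1 = PySem.Chars.islower c)
    ∧ ((pvClass.getD c 0).testBit 2 = PySem.Chars.isdigit c)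
    ∧ ((pvClass.getD c 0).testBit 3 = pvSpecials.contains c) := by
  have hn : c.toNat < 127 := by
    simp [pvDomChar] at h; omega
  have := pvClassBits_ofNat c.toNat hn
  rwa [Char.ofNat_toNat] at this

-- membership in B's prebuilt set = A's list membership test
lemma pvSetContains (wp : List String) (p : String) :
    (PySem.Set.ofList wp).contains p = wp.contains p := by
  by_cases h : p ∈ wp <;> simp [PySem.Set.mem_ofList, h]

-- on a domain password, B's step equals A's step
lemma pvStep_eq (wp : List String) (st : List String × List String) (pwd : String)
    (h : pvDomStr pwd = true) :
    pvStepB (PySem.Set.ofList wp) st pwd = pvStepA wp st pwd := by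
  have hdom : ∀ c ∈ pwd.toList, pvDomChar c = true := by
    simpa [pvDomStr, List.all_eq_true] using h
  unfold pvStepA pvStepB
  rw [pvSetContains]
  have hb : ∀ i : Nat,
      (pwd.toList.foldl (fun m c => m ||| pvClass.getD c 0) 0).testBit i
        = pwd.toList.any (fun c => (pvClass.getD c 0).testBit i) := by
    intro i; rw [pvMaskBit]; simp
  have e0 : pwd.toList.any (fun c => (pvClass.getD c 0).testBit 0)
      = pwd.toList.any (fun c => PySem.Chars.isupper c) :=
    PySem.List.any_congr_mem (fun c hc => (pvClassBits c (hdom c hc)).1)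
  have e1 : pwd.toList.any (fun c => (pvClass.getD c 0).testBit 1)
      = pwd.toList.any (fun c => PySem.Chars.islower c) :=
    PySem.List.any_congr_mem (fun c hc => (pvClassBits c (hdom c hc)).2.1)
  have e2 : pwd.toList.any (fun c => (pvClass.getD c 0).testBit 2)
      = pwd.toList.any (fun c => PySem.Chars.isdigit c) :=
    PySem.List.any_congr_mem (fun c hc => (pvClassBits c (hdom c hc)).2.2.1)
  have e3 : pwd.toList.any (fun c => (pvClass.getD c 0).testBit 3)
      = pwd.toList.any (fun c => pvSpecials.contains c) :=
    PySem.List.any_congr_mem (fun c hc => (pvClassBits c (hdom c hc)).2.2.2)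
  simp only [PySem.List.enumerate, pvMsgs, List.filter, Int.toNat_zero, Int.reduceAdd, Int.reduceToNat,
    pvBitSel, hb]
  rw [e0, e1, e2, e3]
  by_cases h0 : PySem.Str.len pwd < 8 <;>
    cases h1 : pwd.toList.any (fun c => PySem.Chars.isupper c) <;>
    cases h2 : pwd.toList.any (fun c => PySem.Chars.islower c) <;>
    cases h3 : pwd.toList.any (fun c => PySem.Chars.isdigit c) <;>
    cases h4 : pwd.toList.any (fun c => pvSpecials.contains c) <;>
    simp_all

-- ===== VERDICT (by name: the statement is the Claim_ definition above) =====
theorem check_weak_passwords_spec : Claim_equal_check_weak_passwords := by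
  intro passwords weak_passwords hdom
  unfold Spec_check_weak_passwords check_weak_passwords check_weak_passwords_alt
  have hp : ∀ p ∈ passwords, pvDomStr p = true := by
    unfold Dom_check_weak_passwords at hdom
    simp only [Bool.and_eq_true, List.all_eq_true] at hdom
    exact hdom.1
  exact PySem.List.foldl_congr_mem passwords (pvStepA weak_passwords)
    (pvStepB (PySem.Set.ofList weak_passwords)) ([], [])
    (fun st p hm => (pvStep_eq weak_passwords st p (hp p hm)).symm)
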